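-- pv_equiv track=rewrite | github.com/stevearc/nvim-doc-tools | markdown.py | format_md_table
-- ===== SOURCE A (Python) =====
-- from typing import Dict, Iterable, Iterator, List, Union
--
-- def format_md_table_row(
--     data: Dict, column_names: List[str], max_widths: Dict[str, int]
-- ) -> str:
--     cols = []
--     for col in column_names:
--         cols.append(data.get(col, "").ljust(max_widths[col]))
--     return "| " + " | ".join(cols) + " |\n"
--
-- def format_md_table(rows: List[Dict], column_names: List[str]) -> List[str]:
--     max_widths: Dict[str, int] = {col: max(3, len(col)) for col in column_names}
--     for row in rows:
--         for col in column_names: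
--             max_widths[col] = max(max_widths[col], len(row.get(col, "")))
--     lines = []
--     titles = []
--     for col in column_names:
--         titles.append(col.ljust(max_widths[col]))
--     lines.append("| " + " | ".join(titles) + " |\n")
--     seps = []
--     for col in column_names:
--         seps.append(max_widths[col] * "-")
--     lines.append("| " + " | ".join(seps) + " |\n")
--     for row in rows:
--         lines.append(format_md_table_row(row, column_names, max_widths))
--     return lines
-- ===== SOURCE B (Python) =====
-- def format_md_table(rows, column_names):
--     columns = []
--     for col in column_names:
--         cells = [row.get(col, "") for row in rows]
--         w = max([3, len(col)] + [len(c) for c in cells])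
--         columns.append([col.ljust(w), w * "-"] + [c.ljust(w) for c in cells])
--     lines = []
--     for i in range(2 + len(rows)):
--         lines.append("| " + " | ".join([c[i] for c in columns]) + " |\n")
--     return lines
-- ===== Notes on version B (the rewrite author's own statement) =====
-- stated objective: alternative
-- what changed: B builds the table column-major: per column it extracts all cells, computes the width once and emits a fully padded column (header, dashes, cells), then transposes by index to produce the lines, instead of A's row-major passes over a shared width dict.
import Mathlib
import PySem

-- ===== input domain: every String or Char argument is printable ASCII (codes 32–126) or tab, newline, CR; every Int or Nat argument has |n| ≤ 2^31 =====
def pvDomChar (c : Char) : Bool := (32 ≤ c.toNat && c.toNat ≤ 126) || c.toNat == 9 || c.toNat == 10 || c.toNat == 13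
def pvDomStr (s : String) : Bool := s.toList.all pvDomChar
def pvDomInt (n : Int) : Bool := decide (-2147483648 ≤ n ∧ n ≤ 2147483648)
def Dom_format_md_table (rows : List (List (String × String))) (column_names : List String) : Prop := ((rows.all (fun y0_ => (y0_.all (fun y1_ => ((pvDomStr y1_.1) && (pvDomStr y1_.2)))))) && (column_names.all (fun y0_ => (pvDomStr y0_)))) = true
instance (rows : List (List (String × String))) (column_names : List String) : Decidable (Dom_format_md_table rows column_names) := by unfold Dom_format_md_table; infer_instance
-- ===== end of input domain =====

-- B re-implements the table column-major (per-column cells/width, then a transpose) instead of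
-- A's row-major passes over a shared width dict; same output, similar cost ("alternative").

-- len(s) on a Python str, as a Nat (= PySem.Chars.len s.toList)
def slen (s : String) : Nat := s.toList.length

-- shared helpers for the Python standard-library calls both sources make
-- row.get(col, "") on the association-list dict (first match)
def rowGet (row : List (String × String)) (col : String) : String :=
  (PySem.Dict.mk row).getD col ""

-- s.ljust(w) (exact: pad with spaces on the right up to width w)
def pyLjust (s : String) (w : Nat) : String :=
  String.ofList (s.toList ++ List.replicate (w - slen s) ' ')

-- "| " + " | ".join(cells) + " |\n"
def mkLine (cells : List String) : String :=
  PySem.Str.join "" ["| ", PySem.Str.join " | " cells, " |\n"]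

-- ===== PORT A =====
def format_md_table_row (data : List (String × String)) (column_names : List String)
    (max_widths : PySem.Dict String Nat) : String :=
  let cols := column_names.foldl
    (fun acc col => acc ++ [pyLjust (rowGet data col) (max_widths.getD col 0)]) []
  mkLine cols

def format_md_table (rows : List (List (String × String))) (column_names : List String) : List String :=
  let mw0 : PySem.Dict String Nat :=
    column_names.foldl (fun d col => d.insert col (max 3 (slen col))) PySem.Dict.empty
  let mw := rows.foldl (fun d row =>
    column_names.foldl
      (fun d col => d.insert col (max (d.getD col 0) (slen (rowGet row col)))) d) mw0
  let titles := column_names.foldl (fun acc col => acc ++ [pyLjust col (mw.getD col 0)]) []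
  let seps := column_names.foldl
    (fun acc col => acc ++ [String.ofList (List.replicate (mw.getD col 0) '-')]) []
  let lines : List String := [mkLine titles, mkLine seps]
  rows.foldl (fun acc row => acc ++ [format_md_table_row row column_names mw]) lines

-- ===== PORT B =====
def format_md_table_alt (rows : List (List (String × String))) (column_names : List String) : List String :=
  let columns : List (List String) := column_names.foldl (fun acc col =>
    let cells := rows.map (fun row => rowGet row col)
    let w := (PySem.List.max? (3 :: slen col :: cells.map slen)
                (fun x => x)).getD 0
    acc ++ [pyLjust col w :: String.ofList (List.replicate w '-') :: cells.map (fun c => pyLjust c w)]) []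
  (List.range (2 + rows.length)).map (fun i => mkLine (columns.map (fun c => c.getD i "")))

-- ===== PRECONDITION & SPEC =====
def Spec_format_md_table (rows : List (List (String × String))) (column_names : List String) (out : List String) : Prop := out = format_md_table_alt rows column_names
instance (rows : List (List (String × String))) (column_names : List String) (out : List String) : Decidable (Spec_format_md_table rows column_names out) := by unfold Spec_format_md_table; infer_instance

-- ===== CLAIM (what is proved, stated in full; the proofs are below) =====
def Claim_equal_format_md_table : Prop := ∀ (rows : List (List (String × String))) (column_names : List String), Dom_format_md_table rows column_names → Spec_format_md_table rows column_names (format_md_table rows column_names)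

-- ===== LEMMAS AND PROOFS =====

-- the common column width: max(3, len(col), lengths of the column's cells)
def colW (rows : List (List (String × String))) (col : String) : Nat :=
  (rows.map (fun row => slen (rowGet row col))).foldl max (max 3 (slen col))

-- A's initial width dict, looked up
theorem getD_mw0 (cns : List String) (d : PySem.Dict String Nat) (c : String) :
    (cns.foldl (fun d col => d.insert col (max 3 (slen col))) d).getD c 0
      = if c ∈ cns then max 3 (slen c) else d.getD c 0 := by
  induction cns generalizing d with
  | nil => simp
  | cons x t ih =>
    simp only [List.foldl_cons, ih, PySem.Dict.getD_insert, List.mem_cons]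
    split_ifs with h1 h2 h2 <;> simp_all

-- A's inner (per-row) width update, looked up
theorem getD_inner (cns : List String) (f : String → Nat) (d : PySem.Dict String Nat) (c : String) :
    (cns.foldl (fun d col => d.insert col (max (d.getD col 0) (f col))) d).getD c 0
      = if c ∈ cns then max (d.getD c 0) (f c) else d.getD c 0 := by
  induction cns generalizing d with
  | nil => simp
  | cons x t ih =>
    simp only [List.foldl_cons, ih, PySem.Dict.getD_insert, List.mem_cons]
    split_ifs with h1 h2 h2 <;> simp_all

-- A's outer (all-rows) width loop, looked up
theorem getD_outer (rows : List (List (String × String))) (cns : List String)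
    (d : PySem.Dict String Nat) (c : String) :
    (rows.foldl (fun d row =>
        cns.foldl (fun d col => d.insert col (max (d.getD col 0) (slen (rowGet row col)))) d) d).getD c 0
      = if c ∈ cns then
          (rows.map (fun row => slen (rowGet row c))).foldl max (d.getD c 0)
        else d.getD c 0 := by
  induction rows generalizing d with
  | nil => simp
  | cons r t ih =>
    simp only [List.foldl_cons, ih, List.map_cons,
      getD_inner cns (fun col => slen (rowGet r col)) d c]
    split_ifs with h <;> simp

-- the full width dict of A agrees with colW on every column name
theorem getD_mw (rows : List (List (String × String))) (cns : List String) (c : String)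
    (hc : c ∈ cns) :
    ((rows.foldl (fun d row =>
        cns.foldl (fun d col => d.insert col (max (d.getD col 0) (slen (rowGet row col)))) d)
      (cns.foldl (fun d col => d.insert col (max 3 (slen col))) PySem.Dict.empty)).getD c 0)
      = colW rows c := by
  rw [getD_outer, getD_mw0]
  simp [hc, colW]

-- B's per-column width is colW
theorem width_alt (rows : List (List (String × String))) (col : String) :
    ((PySem.List.max? (3 :: slen col ::
        (rows.map (fun row => rowGet row col)).map slen) (fun x => x)).getD 0)
      = colW rows col := by
  rw [PySem.List.max?_id_cons]
  simp [colW, List.map_map, Function.comp_def, Nat.max_comm 3]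

-- A's result, in canonical (colW-based) form
theorem A_canon (rows : List (List (String × String))) (cns : List String) :
    format_md_table rows cns
      = mkLine (cns.map fun col => pyLjust col (colW rows col))
        :: mkLine (cns.map fun col => String.ofList (List.replicate (colW rows col) '-'))
        :: rows.map (fun row => mkLine (cns.map fun col => pyLjust (rowGet row col) (colW rows col))) := by
  simp only [format_md_table, format_md_table_row,
    PySem.List.foldl_append_singleton_eq_map, List.nil_append, List.cons_append]
  congr 1
  · exact congrArg mkLine (List.map_congr_left fun col hc => by rw [getD_mw rows cns col hc])
  congr 1
  · exact congrArg mkLine (List.map_congr_left fun col hc => by rw [getD_mw rows cns col hc])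
  · exact List.map_congr_left fun row _ =>
      congrArg mkLine (List.map_congr_left fun col hc => by rw [getD_mw rows cns col hc])

-- B's result, in the same canonical form
theorem B_canon (rows : List (List (String × String))) (cns : List String) :
    format_md_table_alt rows cns
      = mkLine (cns.map fun col => pyLjust col (colW rows col))
        :: mkLine (cns.map fun col => String.ofList (List.replicate (colW rows col) '-'))
        :: rows.map (fun row => mkLine (cns.map fun col => pyLjust (rowGet row col) (colW rows col))) := by
  simp only [format_md_table_alt, PySem.List.foldl_append_singleton_eq_map, List.nil_append,
    width_alt]
  rw [Nat.add_comm 2 rows.length, List.range_succ_eq_map, List.range_succ_eq_map]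
  simp only [List.map_cons, List.map_map, Function.comp_def, List.getD_cons_zero,
    List.getD_cons_succ, Nat.succ_eq_add_one]
  congr 1
  congr 1
  apply List.ext_getElem (by simp)
  intro k hk hk'
  have hkn : k < rows.length := by simpa using hk
  simp only [List.getElem_map, List.getElem_range]
  congr 1
  apply List.map_congr_left
  intro col _
  rw [List.getD_eq_getElem _ _ (by simpa using hkn)]
  simp

theorem format_md_table_spec : Claim_equal_format_md_table := by
  unfold Claim_equal_format_md_table Spec_format_md_table
  intro rows cns _
  rw [A_canon, B_canon]
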